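-- pv_equiv track=rewrite | github.com/GustavoJae/Adversarial-Attack | main.py | get_popular_target_labels
-- ===== SOURCE A (Python) =====
-- COMMON_TARGET_LABEL_CANDIDATES = [
--     "tabby",
--     "tiger_cat",
--     "Persian_cat",
--     "Siamese_cat",
--     "Egyptian_cat",
--     "Chihuahua",
--     "pug",
--     "beagle",
--     "golden_retriever",
--     "Labrador_retriever",
--     "German_shepherd",
--     "Siberian_husky",
--     "red_fox",
--     "timber_wolf",
--     "lion",
--     "tiger",
--     "leopard",
--     "cheetah",
--     "brown_bear",
--     "polar_bear",
--     "giant_panda",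
--     "zebra",
--     "giraffe",
--     "African_elephant",
--     "hippopotamus",
--     "koala",
--     "kangaroo",
--     "gorilla",
--     "chimpanzee",
--     "orangutan",
--     "meerkat",
-- ]
--
-- def get_popular_target_labels(labels):
--     """Filtra um subconjunto de classes populares e usa fallback se necessário."""
--     available_labels = []
--     seen_labels = set()
--
--     for candidate in COMMON_TARGET_LABEL_CANDIDATES:
--         for idx, label in labels.items():
--             if label == candidate and label not in seen_labels:
--                 available_labels.append((idx, label))
--                 seen_labels.add(label)
--                 break
--
--     if available_labels:
--         return available_labels
--
--     return sorted(labels.items(), key=lambda x: x[1])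
-- ===== SOURCE B (Python) =====
-- COMMON_TARGET_LABEL_CANDIDATES = [
--     "tabby",
--     "tiger_cat",
--     "Persian_cat",
--     "Siamese_cat",
--     "Egyptian_cat",
--     "Chihuahua",
--     "pug",
--     "beagle",
--     "golden_retriever",
--     "Labrador_retriever",
--     "German_shepherd",
--     "Siberian_husky",
--     "red_fox",
--     "timber_wolf",
--     "lion",
--     "tiger",
--     "leopard",
--     "cheetah",
--     "brown_bear",
--     "polar_bear",
--     "giant_panda",
--     "zebra",
--     "giraffe",
--     "African_elephant",
--     "hippopotamus",
--     "koala",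
--     "kangaroo",
--     "gorilla",
--     "chimpanzee",
--     "orangutan",
--     "meerkat",
-- ]
--
-- def get_popular_target_labels(labels):
--     """Single pass over labels with a rank dict, then one sort by rank."""
--     rank = dict((c, i) for i, c in enumerate(COMMON_TARGET_LABEL_CANDIDATES))
--     picked = []
--     taken = set()
--     for idx, label in labels.items():
--         r = rank.get(label)
--         if r is not None:
--             if label not in taken:
--                 picked.append((r, idx, label))
--                 taken.add(label)
--     if picked:
--         picked.sort(key=lambda t: t[0])
--         return [(idx, label) for _, idx, label in picked]
--     return sorted(labels.items(), key=lambda x: x[1])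
-- ===== Notes on version B (the rewrite author's own statement) =====
-- stated objective: faster
-- what changed: Instead of rescanning labels once per each of the 31 candidate strings, B builds a candidate->rank dict once, makes a single pass over labels collecting the first occurrence of each candidate label, and sorts the small collected list by rank; the fallback sort is unchanged.
import Mathlib
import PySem

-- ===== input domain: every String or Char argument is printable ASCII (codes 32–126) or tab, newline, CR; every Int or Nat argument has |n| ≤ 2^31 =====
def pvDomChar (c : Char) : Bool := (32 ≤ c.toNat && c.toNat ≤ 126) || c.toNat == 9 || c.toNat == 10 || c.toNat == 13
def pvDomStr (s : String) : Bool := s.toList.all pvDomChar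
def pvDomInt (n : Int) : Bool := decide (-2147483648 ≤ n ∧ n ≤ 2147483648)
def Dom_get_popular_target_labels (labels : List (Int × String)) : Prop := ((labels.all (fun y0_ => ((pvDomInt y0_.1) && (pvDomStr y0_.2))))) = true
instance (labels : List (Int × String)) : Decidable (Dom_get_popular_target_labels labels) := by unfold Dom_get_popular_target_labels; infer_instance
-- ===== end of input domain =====

-- B replaces A's per-candidate rescans of labels by one rank dict, one pass over labels and a sort by rank (faster by a constant factor).

-- module constant COMMON_TARGET_LABEL_CANDIDATES
def pvCandidates : List String :=
  ["tabby", "tiger_cat", "Persian_cat", "Siamese_cat", "Egyptian_cat", "Chihuahua",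
   "pug", "beagle", "golden_retriever", "Labrador_retriever", "German_shepherd",
   "Siberian_husky", "red_fox", "timber_wolf", "lion", "tiger", "leopard", "cheetah",
   "brown_bear", "polar_bear", "giant_panda", "zebra", "giraffe", "African_elephant",
   "hippopotamus", "koala", "kangaroo", "gorilla", "chimpanzee", "orangutan", "meerkat"]

-- ===== PORT A =====
-- inner 'for idx, label in labels.items(): … break' loop of A
def pvScanA : List (Int × String) → String → PySem.Set String → Option (Int × String)
  | [], _, _ => none
  | (idx, label) :: rest, c, seen =>
    if label == c && !(PySem.Set.contains seen label) then some (idx, label)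
    else pvScanA rest c seen

-- body of A's outer 'for candidate in COMMON_TARGET_LABEL_CANDIDATES' loop
def pvStepA (labels : List (Int × String))
    (st : List (Int × String) × PySem.Set String) (c : String) :
    List (Int × String) × PySem.Set String :=
  match pvScanA labels c st.2 with
  | some (idx, label) => (st.1 ++ [(idx, label)], PySem.Set.add st.2 label)
  | none => st

def get_popular_target_labels (labels : List (Int × String)) : List (Int × String) :=
  let st := pvCandidates.foldl (pvStepA labels) ([], PySem.Set.empty)
  if st.1 ≠ [] then st.1
  else PySem.List.sorted labels (fun x => x.2) false

-- ===== PORT B =====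
-- rank = dict((c, i) for i, c in enumerate(COMMON_TARGET_LABEL_CANDIDATES))
def pvRank : PySem.Dict String Int :=
  PySem.Dict.ofList ((PySem.List.enumerate pvCandidates 0).map (fun ic => (ic.2, ic.1)))

-- body of B's single 'for idx, label in labels.items()' loop
def pvStepB (st : List (Int × Int × String) × PySem.Set String) (p : Int × String) :
    List (Int × Int × String) × PySem.Set String :=
  match pvRank.get? p.2 with
  | some r =>
    if !(PySem.Set.contains st.2 p.2) then
      (st.1 ++ [(r, p.1, p.2)], PySem.Set.add st.2 p.2)
    else st
  | none => st

def get_popular_target_labels_alt (labels : List (Int × String)) : List (Int × String) :=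
  let st := labels.foldl pvStepB ([], PySem.Set.empty)
  if st.1 ≠ [] then
    (PySem.List.sorted st.1 (fun t => t.1) false).map (fun t => (t.2.1, t.2.2))
  else PySem.List.sorted labels (fun x => x.2) false

-- ===== PRECONDITION & SPEC =====
def Spec_get_popular_target_labels (labels : List (Int × String)) (out : List (Int × String)) : Prop := out = get_popular_target_labels_alt labels
instance (labels : List (Int × String)) (out : List (Int × String)) : Decidable (Spec_get_popular_target_labels labels out) := by unfold Spec_get_popular_target_labels; infer_instance

-- ===== CLAIM (what is proved, stated in full; the proofs are below) =====
def Claim_equal_get_popular_target_labels : Prop := ∀ (labels : List (Int × String)), Dom_get_popular_target_labels labels → Spec_get_popular_target_labels labels (get_popular_target_labels labels)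

-- ===== LEMMAS AND PROOFS =====

-- first item of labels carrying the candidate string c
def pvFind (labels : List (Int × String)) (c : String) : Option (Int × String) :=
  labels.find? (fun p => p.2 == c)

-- A's list of picked pairs, in candidate order
def pvS (labels : List (Int × String)) : List (Int × String) :=
  pvCandidates.filterMap (pvFind labels)

-- the picked pairs tagged with their candidate rank, in candidate order
def pvS' (labels : List (Int × String)) : List (Int × Int × String) :=
  (PySem.List.enumerate pvCandidates 0).filterMap
    (fun ic => (pvFind labels ic.2).map (fun p => (ic.1, p.1, p.2)))

-- B's collected triples, recursively
def pvCollect : List (Int × String) → PySem.Set String → List (Int × Int × String)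
  | [], _ => []
  | p :: rest, seen =>
    match pvRank.get? p.2 with
    | some r =>
      if PySem.Set.contains seen p.2 then pvCollect rest seen
      else (r, p.1, p.2) :: pvCollect rest (PySem.Set.add seen p.2)
    | none => pvCollect rest seen

lemma pvFind_some {labels : List (Int × String)} {c : String} {p : Int × String}
    (h : pvFind labels c = some p) : p.2 = c ∧ p ∈ labels := by
  unfold pvFind at h
  refine ⟨by simpa using List.find?_some h, List.mem_of_find?_eq_some h⟩

lemma pvScanA_eq_find (ls : List (Int × String)) (c : String) (seen : PySem.Set String)
    (h : PySem.Set.contains seen c = false) : pvScanA ls c seen = pvFind ls c := by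
  induction ls with
  | nil => rfl
  | cons p rest ih =>
    obtain ⟨i, l⟩ := p
    by_cases hl : l = c
    · subst hl
      have hn : ¬ l ∈ seen := by simpa using h
      simp [pvScanA, pvFind, List.find?, hn]
    · have hb : (l == c) = false := by simpa using hl
      simp [pvScanA, pvFind, List.find?, hb]
      exact ih

lemma pvFoldA (labels : List (Int × String)) :
    ∀ (cs : List String) (avail : List (Int × String)) (seen : PySem.Set String),
    cs.Nodup → (∀ c ∈ cs, PySem.Set.contains seen c = false) →
    (cs.foldl (pvStepA labels) (avail, seen)).1 = avail ++ cs.filterMap (pvFind labels) := by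
  intro cs
  induction cs with
  | nil => intro avail seen _ _; simp
  | cons c cs ih =>
    intro avail seen hnd hs
    have hc : PySem.Set.contains seen c = false := hs c (by simp)
    have hstep : pvStepA labels (avail, seen) c =
        match pvFind labels c with
        | some (idx, label) => (avail ++ [(idx, label)], PySem.Set.add seen label)
        | none => (avail, seen) := by
      unfold pvStepA
      rw [pvScanA_eq_find labels c seen hc]
    rcases hf : pvFind labels c with _ | p
    · rw [List.foldl_cons, hstep, hf]
      rw [ih avail seen hnd.of_cons (fun c' hc' => hs c' (by simp [hc']))]
      simp [hf]
    · obtain ⟨idx, label⟩ := p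
      have hlab : label = c := (pvFind_some hf).1
      subst hlab
      rw [List.foldl_cons, hstep, hf]
      rw [ih (avail ++ [(idx, label)]) (PySem.Set.add seen label)]
      · simp [hf]
      · exact hnd.of_cons
      · intro c' hc'
        have h1 : c' ≠ label := by
          rintro rfl; exact (List.nodup_cons.mp hnd).1 hc'
        have h2 : PySem.Set.contains seen c' = false := hs c' (by simp [hc'])
        have : ¬ c' ∈ PySem.Set.add seen label := by
          rw [PySem.Set.mem_add]
          rintro (hm | rfl)
          · exact (by simpa using h2 : ¬ c' ∈ seen) hm
          · exact h1 rfl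
        simpa using this

lemma pvA_eq (labels : List (Int × String)) :
    get_popular_target_labels labels =
      if pvS labels ≠ [] then pvS labels
      else PySem.List.sorted labels (fun x => x.2) false := by
  show (if (List.foldl (pvStepA labels) ([], PySem.Set.empty) pvCandidates).1 ≠ [] then
      (List.foldl (pvStepA labels) ([], PySem.Set.empty) pvCandidates).1
    else PySem.List.sorted labels (fun x => x.2) false) = _
  rw [pvFoldA labels pvCandidates [] PySem.Set.empty (by decide) (fun c _ => rfl)]
  simp [pvS]

lemma pvRank_get (lab : String) (r : Int) :
    pvRank.get? lab = some r ↔ (r, lab) ∈ PySem.List.enumerate pvCandidates 0 := by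
  have hnd : pvRank.keys.Nodup := by decide
  have hitems : pvRank.items = (PySem.List.enumerate pvCandidates 0).map (fun ic => (ic.2, ic.1)) := by decide
  rw [PySem.Dict.get?_eq_some_iff_mem_items pvRank lab r hnd, hitems]
  constructor
  · intro h
    obtain ⟨ic, hm, he⟩ := List.mem_map.mp h
    obtain ⟨a, b⟩ := ic
    simp only [Prod.mk.injEq] at he
    obtain ⟨rfl, rfl⟩ := he
    exact hm
  · intro h
    exact List.mem_map.mpr ⟨(r, lab), h, rfl⟩

lemma pvFoldB (ls : List (Int × String)) :
    ∀ (acc : List (Int × Int × String)) (seen : PySem.Set String),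
    (ls.foldl pvStepB (acc, seen)).1 = acc ++ pvCollect ls seen := by
  induction ls with
  | nil => intro acc seen; simp [pvCollect]
  | cons p rest ih =>
    intro acc seen
    rw [List.foldl_cons]
    rcases hr : pvRank.get? p.2 with _ | r
    · have hstep : pvStepB (acc, seen) p = (acc, seen) := by unfold pvStepB; rw [hr]
      rw [hstep, ih acc seen]
      simp [pvCollect, hr]
    · by_cases hm : p.2 ∈ seen
      · have hstep : pvStepB (acc, seen) p = (acc, seen) := by
          unfold pvStepB; rw [hr]; simp [hm]
        rw [hstep, ih acc seen]
        simp [pvCollect, hr, hm]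
      · have hstep : pvStepB (acc, seen) p =
            (acc ++ [(r, p.1, p.2)], PySem.Set.add seen p.2) := by
          unfold pvStepB; rw [hr]; simp [hm]
        rw [hstep, ih (acc ++ [(r, p.1, p.2)]) (PySem.Set.add seen p.2)]
        simp [pvCollect, hr, hm]

lemma pvCollect_cons_none {p : Int × String} {rest : List (Int × String)}
    {seen : PySem.Set String} (h : pvRank.get? p.2 = none) :
    pvCollect (p :: rest) seen = pvCollect rest seen := by
  simp [pvCollect, h]

lemma pvCollect_cons_seen {p : Int × String} {rest : List (Int × String)}
    {seen : PySem.Set String} {r : Int} (h : pvRank.get? p.2 = some r) (hm : p.2 ∈ seen) :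
    pvCollect (p :: rest) seen = pvCollect rest seen := by
  simp [pvCollect, h, hm]

lemma pvCollect_cons_new {p : Int × String} {rest : List (Int × String)}
    {seen : PySem.Set String} {r : Int} (h : pvRank.get? p.2 = some r) (hm : ¬ p.2 ∈ seen) :
    pvCollect (p :: rest) seen = (r, p.1, p.2) :: pvCollect rest (PySem.Set.add seen p.2) := by
  simp [pvCollect, h, hm]

lemma pvFind_cons_self {p : Int × String} {rest : List (Int × String)} :
    pvFind (p :: rest) p.2 = some p := by
  simp [pvFind, List.find?]

lemma pvFind_cons_ne {p : Int × String} {rest : List (Int × String)} {c : String}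
    (h : c ≠ p.2) : pvFind (p :: rest) c = pvFind rest c := by
  simp [pvFind, List.find?, show (p.2 == c) = false from by simp [Ne.symm h]]

lemma pvNotMem_of_contains_false {seen : PySem.Set String} {c : String}
    (h : PySem.Set.contains seen c = false) : ¬ c ∈ seen := by simpa using h

lemma pvContains_false_of_notMem {seen : PySem.Set String} {c : String}
    (h : ¬ c ∈ seen) : PySem.Set.contains seen c = false := by simpa using h

lemma pvCollect_mem (ls : List (Int × String)) :
    ∀ (seen : PySem.Set String) (t : Int × Int × String),
    t ∈ pvCollect ls seen ↔
      PySem.Set.contains seen t.2.2 = false ∧ pvRank.get? t.2.2 = some t.1 ∧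
        pvFind ls t.2.2 = some (t.2.1, t.2.2) := by
  induction ls with
  | nil => intro seen t; simp [pvCollect, pvFind]
  | cons p rest ih =>
    intro seen t
    obtain ⟨r0, i0, s0⟩ := t
    rcases hr : pvRank.get? p.2 with _ | r
    · rw [pvCollect_cons_none hr, ih seen (r0, i0, s0)]
      by_cases hps : s0 = p.2
      · subst hps
        simp only [hr]
        constructor
        · rintro ⟨_, hg, _⟩; exact absurd hg (by simp)
        · rintro ⟨_, hg, _⟩; exact absurd hg (by simp)
      · rw [pvFind_cons_ne hps]
    · by_cases hm : p.2 ∈ seen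
      · rw [pvCollect_cons_seen hr hm, ih seen (r0, i0, s0)]
        by_cases hps : s0 = p.2
        · subst hps
          constructor
          · rintro ⟨hc, _, _⟩; exact absurd hm (pvNotMem_of_contains_false hc)
          · rintro ⟨hc, _, _⟩; exact absurd hm (pvNotMem_of_contains_false hc)
        · rw [pvFind_cons_ne hps]
      · rw [pvCollect_cons_new hr hm, List.mem_cons, ih _ (r0, i0, s0)]
        by_cases hps : s0 = p.2
        · subst hps
          constructor
          · rintro (he | ⟨hc, _, _⟩)
            · obtain ⟨rfl, rfl, _⟩ := Prod.mk.injEq .. ▸ he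
              exact ⟨pvContains_false_of_notMem hm, hr, pvFind_cons_self⟩
            · have h2 : ¬ p.2 ∈ PySem.Set.add seen p.2 := pvNotMem_of_contains_false hc
              exact absurd ((PySem.Set.mem_add seen p.2 p.2).mpr (Or.inr rfl)) h2
          · rintro ⟨_, hg, hf⟩
            left
            rw [hr] at hg
            obtain rfl : r = r0 := by injection hg
            rw [pvFind_cons_self] at hf
            have h := Option.some.inj hf
            rw [Prod.ext_iff] at h
            rw [h.1]
        · constructor
          · rintro (he | ⟨hc, hg, hf⟩)
            · simp only [Prod.mk.injEq] at he
              exact absurd he.2.2 hps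
            · have hn : ¬ s0 ∈ PySem.Set.add seen p.2 := pvNotMem_of_contains_false hc
              rw [PySem.Set.mem_add] at hn
              push_neg at hn
              refine ⟨pvContains_false_of_notMem hn.1, hg, ?_⟩
              rw [pvFind_cons_ne hps]
              exact hf
          · rintro ⟨hc, hg, hf⟩
            right
            have hns : ¬ s0 ∈ seen := pvNotMem_of_contains_false hc
            have hn : ¬ s0 ∈ PySem.Set.add seen p.2 := by
              rw [PySem.Set.mem_add]
              rintro (h | h)
              · exact hns h
              · exact hps h
            rw [pvFind_cons_ne hps] at hf
            exact ⟨pvContains_false_of_notMem hn, hg, hf⟩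

lemma pvCollect_nodup (ls : List (Int × String)) :
    ∀ (seen : PySem.Set String), (pvCollect ls seen).Nodup := by
  induction ls with
  | nil => intro seen; simp [pvCollect]
  | cons p rest ih =>
    intro seen
    rcases hr : pvRank.get? p.2 with _ | r
    · rw [pvCollect_cons_none hr]; exact ih seen
    · by_cases hm : p.2 ∈ seen
      · rw [pvCollect_cons_seen hr hm]; exact ih seen
      · rw [pvCollect_cons_new hr hm]
        refine List.nodup_cons.mpr ⟨?_, ih _⟩
        intro hmem
        have hc := ((pvCollect_mem rest _ (r, p.1, p.2)).mp hmem).1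
        have : ¬ p.2 ∈ PySem.Set.add seen p.2 := pvNotMem_of_contains_false hc
        exact this ((PySem.Set.mem_add seen p.2 p.2).mpr (Or.inr rfl))

lemma pvS'_pairwise (labels : List (Int × String)) :
    (pvS' labels).Pairwise (fun a b => a.1 < b.1) := by
  unfold pvS'
  rw [List.pairwise_filterMap]
  refine (PySem.List.pairwise_lt_enumerate pvCandidates 0).imp ?_
  intro a b hab x hx y hy
  rcases hfa : pvFind labels a.2 with _ | pa
  · rw [hfa] at hx; exact absurd hx (by simp)
  rcases hfb : pvFind labels b.2 with _ | pb
  · rw [hfb] at hy; exact absurd hy (by simp)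
  rw [hfa] at hx; rw [hfb] at hy
  obtain rfl : x = (a.1, pa.1, pa.2) := by
    simpa using (Option.some.inj hx).symm
  obtain rfl : y = (b.1, pb.1, pb.2) := by
    simpa using (Option.some.inj hy).symm
  exact hab

lemma pvS'_nodup (labels : List (Int × String)) : (pvS' labels).Nodup := by
  refine (pvS'_pairwise labels).imp ?_
  intro a b hab he
  rw [he] at hab
  exact lt_irrefl _ hab

lemma pvS'_mem (labels : List (Int × String)) (t : Int × Int × String) :
    t ∈ pvS' labels ↔
      pvRank.get? t.2.2 = some t.1 ∧ pvFind labels t.2.2 = some (t.2.1, t.2.2) := by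
  unfold pvS'
  rw [List.mem_filterMap]
  constructor
  · rintro ⟨ic, hic, he⟩
    rcases hf : pvFind labels ic.2 with _ | p
    · rw [hf] at he; exact absurd he (by simp)
    · rw [hf] at he
      obtain rfl : t = (ic.1, p.1, p.2) := by simpa using (Option.some.inj he).symm
      obtain ⟨hp2, _⟩ := pvFind_some hf
      constructor
      · rw [pvRank_get]
        simpa [hp2] using hic
      · show pvFind labels p.2 = some (p.1, p.2)
        rw [hp2, hf, ← hp2]
  · rintro ⟨hg, hf⟩
    refine ⟨(t.1, t.2.2), (pvRank_get t.2.2 t.1).mp hg, ?_⟩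
    rw [hf]
    simp

lemma pvPerm (labels : List (Int × String)) :
    (pvS' labels).Perm (pvCollect labels PySem.Set.empty) := by
  rw [List.perm_ext_iff_of_nodup (pvS'_nodup labels) (pvCollect_nodup labels PySem.Set.empty)]
  intro t
  rw [pvS'_mem labels t, pvCollect_mem labels PySem.Set.empty t]
  constructor
  · rintro ⟨hg, hf⟩; exact ⟨rfl, hg, hf⟩
  · rintro ⟨_, hg, hf⟩; exact ⟨hg, hf⟩

lemma pvSorted (labels : List (Int × String)) :
    PySem.List.sorted (pvCollect labels PySem.Set.empty) (fun t => t.1) false = pvS' labels := by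
  exact PySem.List.sorted_eq_of_perm_of_pairwise_lt _ _ _ (pvPerm labels) (pvS'_pairwise labels)

lemma pvS'_map (labels : List (Int × String)) :
    (pvS' labels).map (fun t => (t.2.1, t.2.2)) = pvS labels := by
  unfold pvS' pvS
  rw [List.map_filterMap]
  have h1 : (fun ic : Int × String =>
      Option.map (fun t : Int × Int × String => (t.2.1, t.2.2))
        ((pvFind labels ic.2).map (fun p => (ic.1, p.1, p.2)))) =
      fun ic : Int × String => pvFind labels ic.2 := by
    funext ic
    rcases hf : pvFind labels ic.2 with _ | p <;> simp
  rw [h1]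
  have h2 := List.filterMap_map (f := fun ic : Int × String => ic.2)
    (g := pvFind labels) (l := PySem.List.enumerate pvCandidates 0)
  rw [PySem.List.map_snd_enumerate] at h2
  exact h2.symm

lemma pvB_eq (labels : List (Int × String)) :
    get_popular_target_labels_alt labels =
      if pvS labels ≠ [] then pvS labels
      else PySem.List.sorted labels (fun x => x.2) false := by
  show (if (List.foldl pvStepB ([], PySem.Set.empty) labels).1 ≠ [] then
      (PySem.List.sorted (List.foldl pvStepB ([], PySem.Set.empty) labels).1
        (fun t => t.1) false).map (fun t => (t.2.1, t.2.2))
    else PySem.List.sorted labels (fun x => x.2) false) = _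
  have hfb : (List.foldl pvStepB ([], PySem.Set.empty) labels).1 =
      pvCollect labels PySem.Set.empty := by
    rw [pvFoldB labels [] PySem.Set.empty]
    simp
  rw [hfb]
  have hl : (pvCollect labels PySem.Set.empty).length = (pvS labels).length := by
    rw [← pvS'_map labels, List.length_map, (pvPerm labels).length_eq]
  by_cases h : pvCollect labels PySem.Set.empty = []
  · have h2 : pvS labels = [] := by
      have := hl
      rw [h] at this
      exact List.eq_nil_of_length_eq_zero this.symm
    rw [if_neg (not_not_intro h), if_neg (not_not_intro h2)]
  · have h2 : pvS labels ≠ [] := by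
      intro he
      rw [he] at hl
      exact h (List.eq_nil_of_length_eq_zero hl)
    rw [if_pos h, if_pos h2, pvSorted, pvS'_map]

-- ===== VERDICT (by name: the statement is the Claim_ definition above) =====
theorem get_popular_target_labels_spec : Claim_equal_get_popular_target_labels := by
  intro labels _
  unfold Spec_get_popular_target_labels
  rw [pvA_eq, pvB_eq]
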